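-- pv_equiv track=rewrite | github.com/Fight4Me/Putao_zgn | 全部工作代码/10月/10_10/10_10.py | normal_leven
-- ===== SOURCE A (Python) =====
-- def normal_leven(str1, str2):
--     len_str1 = len(str1) + 1
--     len_str2 = len(str2) + 1
--     matrix = [0 for n in range(len_str1 * len_str2)]
--     for i in range(len_str1):
--       matrix[i] = i
--     for j in range(0, len(matrix), len_str1):
--       if j % len_str1 == 0:
--         matrix[j] = j // len_str1
--     for i in range(1, len_str1):
--       for j in range(1, len_str2):
--         if str1[i-1] == str2[j-1]:
--           cost = 0
--         else:
--           cost = 1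
--         matrix[j*len_str1+i] = min(matrix[(j-1)*len_str1+i]+1,
--                       matrix[j*len_str1+(i-1)]+1,
--                       matrix[(j-1)*len_str1+(i-1)] + cost)
--
--     return 100-matrix[-1]
-- ===== SOURCE B (Python) =====
-- def normal_leven(str1, str2):
--     # anti-diagonal wavefront: fill a (i, j)-keyed table one diagonal i+j = d
--     # at a time; every dependency of a cell lies on an earlier diagonal.
--     m, n = len(str1), len(str2)
--     D = {}
--     for d in range(m + n + 1):
--         for i in range(max(0, d - n), min(m, d) + 1):
--             j = d - i
--             if i == 0:
--                 D[(i, j)] = j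
--             elif j == 0:
--                 D[(i, j)] = i
--             else:
--                 cost = 0 if str1[i - 1] == str2[j - 1] else 1
--                 D[(i, j)] = min(D[(i - 1, j)] + 1,
--                                 D[(i, j - 1)] + 1,
--                                 D[(i - 1, j - 1)] + cost)
--     return 100 - D[(m, n)]
-- ===== Notes on version B (the rewrite author's own statement) =====
-- stated objective: alternative
-- what changed: Replaces A's three staged passes over a row-major flat (m+1)*(n+1) array (index arithmetic j*len1+i) by a single anti-diagonal wavefront pass that fills an (i,j)-keyed dictionary one diagonal i+j=d at a time, with the base cases handled inline; correctness rests on every dependency of a cell lying on an earlier diagonal.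
import Mathlib
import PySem

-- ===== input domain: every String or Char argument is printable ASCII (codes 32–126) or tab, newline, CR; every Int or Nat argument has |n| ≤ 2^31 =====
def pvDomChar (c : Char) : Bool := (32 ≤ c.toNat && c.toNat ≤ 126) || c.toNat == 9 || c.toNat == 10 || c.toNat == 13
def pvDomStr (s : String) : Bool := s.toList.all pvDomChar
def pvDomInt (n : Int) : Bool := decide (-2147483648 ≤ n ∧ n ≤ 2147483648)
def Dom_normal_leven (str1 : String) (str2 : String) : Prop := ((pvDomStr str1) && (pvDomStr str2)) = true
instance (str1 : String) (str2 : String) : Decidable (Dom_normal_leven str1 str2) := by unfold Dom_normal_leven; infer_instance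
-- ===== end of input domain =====

-- B replaces A's three staged passes over a row-major flat array by one anti-diagonal wavefront pass filling an (i,j)-keyed dictionary; same return value on all inputs.

-- ===== PORT A =====
def normal_leven (str1 : String) (str2 : String) : Int :=
  let s1 := str1.toList
  let s2 := str2.toList
  let len_str1 : Int := (s1.length : Int) + 1
  let len_str2 : Int := (s2.length : Int) + 1
  let matrix : List Int := (PySem.List.pyRange 0 (len_str1 * len_str2) 1).map (fun _ => 0)
  let matrix := (PySem.List.pyRange 0 len_str1 1).foldl (fun M i => PySem.List.pySetD M i i) matrix
  let matrix := (PySem.List.pyRange 0 (matrix.length : Int) len_str1).foldl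
      (fun M j => if PySem.Int.mod j len_str1 = 0
                  then PySem.List.pySetD M j (PySem.Int.floordiv j len_str1) else M) matrix
  let matrix := (PySem.List.pyRange 1 len_str1 1).foldl (fun M i =>
      (PySem.List.pyRange 1 len_str2 1).foldl (fun M j =>
        let cost : Int := if PySem.List.pyGetD s1 (i-1) ' ' = PySem.List.pyGetD s2 (j-1) ' ' then 0 else 1
        PySem.List.pySetD M (j*len_str1+i)
          (min (PySem.List.pyGetD M ((j-1)*len_str1+i) 0 + 1)
           (min (PySem.List.pyGetD M (j*len_str1+(i-1)) 0 + 1)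
                (PySem.List.pyGetD M ((j-1)*len_str1+(i-1)) 0 + cost)))) M) matrix
  100 - PySem.List.pyGetD matrix (-1) 0

-- ===== PORT B =====
-- anti-diagonal wavefront, exactly as in Source B; the dictionary lookups use getD 0,
-- exact here because the looked-up keys are always present (they lie on earlier diagonals).
def cellB (s1 s2 : List Char) (d : Int) :
    PySem.Dict (Int × Int) Int → Int → PySem.Dict (Int × Int) Int :=
  fun D i =>
    let j := d - i
    if i = 0 then D.insert (i, j) j
    else if j = 0 then D.insert (i, j) i
    else
      let cost : Int := if PySem.List.pyGetD s1 (i-1) ' ' = PySem.List.pyGetD s2 (j-1) ' ' then 0 else 1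
      D.insert (i, j) (min (D.getD (i-1, j) 0 + 1)
        (min (D.getD (i, j-1) 0 + 1) (D.getD (i-1, j-1) 0 + cost)))

def diagB (s1 s2 : List Char) (m n : Int) :
    PySem.Dict (Int × Int) Int → Int → PySem.Dict (Int × Int) Int :=
  fun D d => (PySem.List.pyRange (max 0 (d - n)) (min m d + 1) 1).foldl (cellB s1 s2 d) D

def normal_leven_alt (str1 : String) (str2 : String) : Int :=
  let s1 := str1.toList
  let s2 := str2.toList
  let m : Int := (s1.length : Int)
  let n : Int := (s2.length : Int)
  let D := (PySem.List.pyRange 0 (m + n + 1) 1).foldl (diagB s1 s2 m n) PySem.Dict.empty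
  100 - D.getD (m, n) 0

-- ===== PRECONDITION & SPEC =====
def Spec_normal_leven (str1 : String) (str2 : String) (out : Int) : Prop := out = normal_leven_alt str1 str2
instance (str1 : String) (str2 : String) (out : Int) : Decidable (Spec_normal_leven str1 str2 out) := by unfold Spec_normal_leven; infer_instance

-- ===== CLAIM (what is proved, stated in full; the proofs are below) =====
def Claim_equal_normal_leven : Prop := ∀ (str1 : String) (str2 : String), Dom_normal_leven str1 str2 → Spec_normal_leven str1 str2 (normal_leven str1 str2)

-- ===== LEMMAS AND PROOFS =====

-- reference function: edit distance of s1[:i] vs s2[:j]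
def levRef (s1 s2 : List Char) : Nat → Nat → Nat
  | 0, j => j
  | i+1, 0 => i+1
  | i+1, j+1 =>
      min (levRef s1 s2 i (j+1) + 1) (min (levRef s1 s2 (i+1) j + 1)
        (levRef s1 s2 i j + (if s1.getD i ' ' = s2.getD j ' ' then 0 else 1)))
  termination_by i j => (i, j)


-- generic facts about the flat matrix representation
lemma length_foldl_preserve {α : Type} (l : List α) (f : List Int → α → List Int)
    (h : ∀ M x, (f M x).length = M.length) : ∀ M : List Int, (l.foldl f M).length = M.length := by
  induction l with
  | nil => intro M; rfl
  | cons x xs ih => intro M; rw [List.foldl_cons, ih, h]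

lemma getD_set_of_lt (M : List Int) (k a : Nat) (v : Int) (hk : k < M.length) :
    (M.set k v).getD a 0 = if a = k then v else M.getD a 0 := by
  simp only [List.getD_eq_getElem?_getD, List.getElem?_set]
  by_cases h : a = k
  · subst h; simp [hk]
  · have h' : ¬ (k = a) := fun hh => h hh.symm
    simp [h, h']

lemma flat_mod (L1 i j : Nat) (hi : i < L1) : (j * L1 + i) % L1 = i := by
  rw [Nat.add_comm, Nat.add_mul_mod_self_right, Nat.mod_eq_of_lt hi]

lemma flat_div (L1 i j : Nat) (hi : i < L1) : (j * L1 + i) / L1 = j := by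
  rw [Nat.add_comm, Nat.add_mul_div_right _ _ (by omega : 0 < L1), Nat.div_eq_of_lt hi, Nat.zero_add]

lemma flat_lt (L1 L2 i j : Nat) (hi : i < L1) (hj : j < L2) : j * L1 + i < L1 * L2 := by
  calc j * L1 + i < (j + 1) * L1 := by nlinarith
    _ ≤ L2 * L1 := Nat.mul_le_mul_right _ (by omega)
    _ = L1 * L2 := Nat.mul_comm _ _

lemma flat_inj {L1 i i' j j' : Nat} (hi : i < L1) (hi' : i' < L1)
    (h : j * L1 + i = j' * L1 + i') : i = i' ∧ j = j' := by
  have h1 : (j * L1 + i) % L1 = (j' * L1 + i') % L1 := by rw [h]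
  have h2 : (j * L1 + i) / L1 = (j' * L1 + i') / L1 := by rw [h]
  rw [flat_mod L1 i j hi, flat_mod L1 i' j' hi'] at h1
  rw [flat_div L1 i j hi, flat_div L1 i' j' hi'] at h2
  exact ⟨h1, h2⟩

lemma phase1_getD (M : List Int) : ∀ (k : Nat), k ≤ M.length → ∀ a : Nat,
    ((List.range k).foldl (fun M i => M.set i (i : Int)) M).getD a 0 =
      if a < k then (a : Int) else M.getD a 0 := by
  intro k
  induction k with
  | zero => intro _ a; simp
  | succ k ih =>
    intro hk a
    rw [List.range_succ, List.foldl_append, List.foldl_cons, List.foldl_nil]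
    rw [getD_set_of_lt _ k a _ (by rw [length_foldl_preserve _ _ (by simp)]; omega)]
    rw [ih (by omega)]
    split_ifs <;> omega

lemma phase2_getD (L1 : Nat) (hL1 : 0 < L1) (M : List Int) : ∀ (k : Nat), L1 * k ≤ M.length → ∀ a : Nat,
    ((List.range k).foldl (fun M j => M.set (L1 * j) (j : Int)) M).getD a 0 =
      if a % L1 = 0 ∧ a < L1 * k then ((a / L1 : Nat) : Int) else M.getD a 0 := by
  intro k
  induction k with
  | zero => intro _ a; simp
  | succ k ih =>
    intro hk a
    rw [List.range_succ, List.foldl_append, List.foldl_cons, List.foldl_nil]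
    rw [getD_set_of_lt _ (L1 * k) a _ (by rw [length_foldl_preserve _ _ (by simp)]; nlinarith)]
    rw [ih (by nlinarith)]
    by_cases h0 : a % L1 = 0
    · obtain ⟨q, rfl⟩ := Nat.dvd_of_mod_eq_zero h0
      have hdiv : L1 * q / L1 = q := Nat.mul_div_cancel_left q hL1
      by_cases hq : q = k
      · subst hq
        have h1 : ¬ (L1 * q < L1 * q) := by omega
        simp [hdiv, Nat.mul_lt_mul_left hL1]
      · have hne : ¬ (L1 * q = L1 * k) := by
          intro h; exact hq (Nat.eq_of_mul_eq_mul_left hL1 h)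
        have hlt : (L1 * q < L1 * (k+1)) ↔ (L1 * q < L1 * k) := by
          rw [Nat.mul_lt_mul_left hL1, Nat.mul_lt_mul_left hL1]; omega
        simp [hne, h0, hdiv, hlt]
    · have hne : ¬ (a = L1 * k) := by
        intro h; subst h; exact h0 (Nat.mul_mod_right L1 k)
      simp [hne, h0]

lemma levRef_zero_left (s1 s2 : List Char) (j : Nat) : levRef s1 s2 0 j = j := by rw [levRef]

lemma levRef_zero_right (s1 s2 : List Char) (i : Nat) : levRef s1 s2 i 0 = i := by
  cases i <;> rw [levRef]

-- invariant: cells where p holds contain the edit distance, the rest still hold 0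
def MatInv (s1 s2 : List Char) (p : Nat → Nat → Prop) (M : List Int) : Prop :=
  M.length = (s1.length + 1) * (s2.length + 1) ∧
  ∀ i j, i ≤ s1.length → j ≤ s2.length →
    (p i j → M.getD (j * (s1.length + 1) + i) 0 = (levRef s1 s2 i j : Int)) ∧
    (¬ p i j → M.getD (j * (s1.length + 1) + i) 0 = 0)

lemma MatInv_congr (s1 s2 : List Char) (p q : Nat → Nat → Prop) (M : List Int)
    (h : ∀ i j, i ≤ s1.length → j ≤ s2.length → (p i j ↔ q i j)) :
    MatInv s1 s2 p M → MatInv s1 s2 q M := by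
  rintro ⟨hl, hc⟩
  refine ⟨hl, fun i j hi hj => ?_⟩
  obtain ⟨h1, h2⟩ := hc i j hi hj
  exact ⟨fun hq => h1 ((h i j hi hj).mpr hq), fun hq => h2 (fun hp => hq ((h i j hi hj).mp hp))⟩

lemma getD_replicate_zero (N a : Nat) : (List.replicate N (0 : Int)).getD a 0 = 0 := by
  simp only [List.getD_eq_getElem?_getD, List.getElem?_replicate]
  split <;> rfl

lemma init_inv (s1 s2 : List Char) :
    MatInv s1 s2 (fun i j => i = 0 ∨ j = 0)
      ((List.range (s2.length + 1)).foldl (fun M j => M.set ((s1.length + 1) * j) (j : Int))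
        ((List.range (s1.length + 1)).foldl (fun M i => M.set i (i : Int))
          (List.replicate ((s1.length + 1) * (s2.length + 1)) 0))) := by
  have hlen1 : ((List.range (s1.length + 1)).foldl (fun M i => M.set i (i : Int))
      (List.replicate ((s1.length + 1) * (s2.length + 1)) 0)).length
      = (s1.length + 1) * (s2.length + 1) := by
    rw [length_foldl_preserve _ _ (by simp), List.length_replicate]
  have hlen2 : ((List.range (s2.length + 1)).foldl (fun M j => M.set ((s1.length + 1) * j) (j : Int))
      ((List.range (s1.length + 1)).foldl (fun M i => M.set i (i : Int))
        (List.replicate ((s1.length + 1) * (s2.length + 1)) 0))).length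
      = (s1.length + 1) * (s2.length + 1) := by
    rw [length_foldl_preserve _ _ (by simp), hlen1]
  refine ⟨hlen2, fun i j hi hj => ?_⟩
  have hiL : i < s1.length + 1 := by omega
  rw [phase2_getD _ (by omega) _ _ (by rw [hlen1]), phase1_getD _ _ (by rw [List.length_replicate]; nlinarith)]
  rw [flat_mod _ _ _ hiL]
  constructor
  · intro hp
    by_cases hi0 : i = 0
    · subst hi0
      rw [if_pos ⟨rfl, flat_lt _ _ _ _ (by omega) (by omega)⟩, levRef_zero_left]
      rw [flat_div (s1.length + 1) 0 j (by omega)]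
    · have hj0 : j = 0 := by tauto
      subst hj0
      rw [if_neg (by tauto), if_pos (by simpa using hiL), levRef_zero_right]
      omega
  · intro hp
    push_neg at hp
    have hge : (s1.length + 1) ≤ j * (s1.length + 1) :=
      Nat.le_mul_of_pos_left _ (by omega)
    rw [if_neg (fun h => hp.1 h.1), if_neg (by omega), getD_replicate_zero]

-- the inner-loop body of A's phase 3, with the column index i as a parameter
def innerF (s1 s2 : List Char) (i : Int) : List Int → Int → List Int :=
  fun M j =>
    PySem.List.pySetD M (j * ((s1.length : Int) + 1) + i)
      (min (PySem.List.pyGetD M ((j - 1) * ((s1.length : Int) + 1) + i) 0 + 1)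
        (min (PySem.List.pyGetD M (j * ((s1.length : Int) + 1) + (i - 1)) 0 + 1)
          (PySem.List.pyGetD M ((j - 1) * ((s1.length : Int) + 1) + (i - 1)) 0 +
            (if PySem.List.pyGetD s1 (i - 1) ' ' = PySem.List.pyGetD s2 (j - 1) ' ' then 0 else 1))))

lemma innerF_apply (s1 s2 : List Char) (c r : Nat) (P : List Int) :
    innerF s1 s2 ((c : Int) + 1) P ((r : Int) + 1) =
      P.set ((r + 1) * (s1.length + 1) + (c + 1))
        (min (P.getD (r * (s1.length + 1) + (c + 1)) 0 + 1)
          (min (P.getD ((r + 1) * (s1.length + 1) + c) 0 + 1)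
            (P.getD (r * (s1.length + 1) + c) 0 +
              (if s1.getD c ' ' = s2.getD r ' ' then 0 else 1)))) := by
  unfold innerF
  have e1 : ((r : Int) + 1) * ((s1.length : Int) + 1) + ((c : Int) + 1)
      = ((r + 1) * (s1.length + 1) + (c + 1) : Nat) := by push_cast; ring
  have e2 : ((r : Int) + 1 - 1) * ((s1.length : Int) + 1) + ((c : Int) + 1)
      = (r * (s1.length + 1) + (c + 1) : Nat) := by push_cast; ring
  have e3 : ((r : Int) + 1) * ((s1.length : Int) + 1) + ((c : Int) + 1 - 1)
      = ((r + 1) * (s1.length + 1) + c : Nat) := by push_cast; ring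
  have e4 : ((r : Int) + 1 - 1) * ((s1.length : Int) + 1) + ((c : Int) + 1 - 1)
      = (r * (s1.length + 1) + c : Nat) := by push_cast; ring
  have e5 : ((c : Int) + 1 - 1) = ((c : Nat) : Int) := by push_cast; ring
  have e6 : ((r : Int) + 1 - 1) = ((r : Nat) : Int) := by push_cast; ring
  rw [e1, e2, e3, e4, e5, e6, PySem.List.pySetD_natCast, PySem.List.pyGetD_natCast,
    PySem.List.pyGetD_natCast, PySem.List.pyGetD_natCast, PySem.List.pyGetD_natCast,
    PySem.List.pyGetD_natCast]

lemma inner_inv (s1 s2 : List Char) (c : Nat) (hc : c < s1.length) (M : List Int)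
    (hM : MatInv s1 s2 (fun i j => i < c + 1 ∨ j = 0) M) :
    ∀ r, r ≤ s2.length →
      MatInv s1 s2 (fun i j => i < c + 1 ∨ j = 0 ∨ (i = c + 1 ∧ j ≤ r))
        ((PySem.List.pyRange 1 ((r : Int) + 1) 1).foldl (innerF s1 s2 ((c : Int) + 1)) M) := by
  intro r
  induction r with
  | zero =>
    intro _
    rw [PySem.List.pyRange_one_eq_nil (by norm_num)]
    refine MatInv_congr _ _ _ _ _ (fun i j hi hj => ?_) hM
    constructor
    · rintro (h | h)
      · exact Or.inl h
      · exact Or.inr (Or.inl h)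
    · rintro (h | h | ⟨h1, h2⟩)
      · exact Or.inl h
      · exact Or.inr h
      · omega
  | succ r ih =>
    intro hr
    obtain ⟨hPlen, hPcell⟩ := ih (by omega)
    have hcast : ((r + 1 : Nat) : Int) + 1 = (((r : Int) + 1) + 1 : Int) := by push_cast; ring
    rw [hcast, PySem.List.pyRange_one_succ_right (by omega), List.foldl_append,
      List.foldl_cons, List.foldl_nil, innerF_apply]
    have hv1 := (hPcell (c + 1) r (by omega) (by omega)).1 (Or.inr (Or.inr ⟨rfl, le_refl r⟩))
    have hv2 := (hPcell c (r + 1) (by omega) (by omega)).1 (Or.inl (by omega))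
    have hv3 := (hPcell c r (by omega) (by omega)).1 (Or.inl (by omega))
    rw [hv1, hv2, hv3]
    refine ⟨by rw [List.length_set, hPlen], fun i j hi hj => ?_⟩
    rw [getD_set_of_lt _ _ _ _ (by rw [hPlen]; exact flat_lt _ _ _ _ (by omega) (by omega))]
    by_cases heq : j * (s1.length + 1) + i = (r + 1) * (s1.length + 1) + (c + 1)
    · obtain ⟨rfl, rfl⟩ := flat_inj (by omega) (by omega) heq
      rw [if_pos rfl]
      constructor
      · intro _
        rw [levRef]
        push_cast
        rw [min_left_comm]
      · intro hnp; exact absurd (Or.inr (Or.inr ⟨rfl, le_refl _⟩)) hnp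
    · rw [if_neg heq]
      have hiff : (i < c + 1 ∨ j = 0 ∨ (i = c + 1 ∧ j ≤ r + 1)) ↔
          (i < c + 1 ∨ j = 0 ∨ (i = c + 1 ∧ j ≤ r)) := by
        constructor
        · rintro (h | h | ⟨rfl, hle⟩)
          · exact Or.inl h
          · exact Or.inr (Or.inl h)
          · have hj' : j ≠ r + 1 := fun hj' => heq (by rw [hj'])
            exact Or.inr (Or.inr ⟨rfl, by omega⟩)
        · rintro (h | h | ⟨rfl, hle⟩)
          · exact Or.inl h
          · exact Or.inr (Or.inl h)
          · exact Or.inr (Or.inr ⟨rfl, by omega⟩)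
      exact ⟨fun hp => (hPcell i j hi hj).1 (hiff.mp hp),
             fun hp => (hPcell i j hi hj).2 (fun hq => hp (hiff.mpr hq))⟩

def outerF (s1 s2 : List Char) : List Int → Int → List Int :=
  fun M i => (PySem.List.pyRange 1 ((s2.length : Int) + 1) 1).foldl (innerF s1 s2 i) M

lemma outer_inv (s1 s2 : List Char) (M0 : List Int)
    (h0 : MatInv s1 s2 (fun i j => i = 0 ∨ j = 0) M0) :
    ∀ c, c ≤ s1.length →
      MatInv s1 s2 (fun i j => i ≤ c ∨ j = 0)
        ((PySem.List.pyRange 1 ((c : Int) + 1) 1).foldl (outerF s1 s2) M0) := by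
  intro c
  induction c with
  | zero =>
    intro _
    rw [PySem.List.pyRange_one_eq_nil (by norm_num)]
    exact MatInv_congr _ _ _ _ _ (fun i j hi hj => by omega) h0
  | succ c ih =>
    intro hc
    have hcast : ((c + 1 : Nat) : Int) + 1 = (((c : Int) + 1) + 1 : Int) := by push_cast; ring
    rw [hcast, PySem.List.pyRange_one_succ_right (by omega), List.foldl_append,
      List.foldl_cons, List.foldl_nil]
    have hprev := ih (by omega)
    have hstep := inner_inv s1 s2 c (by omega)
      ((PySem.List.pyRange 1 ((c : Int) + 1) 1).foldl (outerF s1 s2) M0)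
      (MatInv_congr _ _ _ _ _ (fun i j hi hj => by omega) hprev)
      s2.length (le_refl _)
    unfold outerF
    exact MatInv_congr _ _ _ _ _ (fun i j hi hj => by constructor <;> intro h <;> omega) hstep

lemma matrix_final (s1 s2 : List Char) (M0 : List Int)
    (h0 : MatInv s1 s2 (fun i j => i = 0 ∨ j = 0) M0) :
    ∀ i j, i ≤ s1.length → j ≤ s2.length →
      ((PySem.List.pyRange 1 ((s1.length : Int) + 1) 1).foldl (outerF s1 s2) M0).getD
          (j * (s1.length + 1) + i) 0 = (levRef s1 s2 i j : Int) := by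
  intro i j hi hj
  exact ((outer_inv s1 s2 M0 h0 s1.length (le_refl _)).2 i j hi hj).1 (Or.inl hi)

lemma matrix_final_len (s1 s2 : List Char) (M0 : List Int)
    (h0 : MatInv s1 s2 (fun i j => i = 0 ∨ j = 0) M0) :
    ((PySem.List.pyRange 1 ((s1.length : Int) + 1) 1).foldl (outerF s1 s2) M0).length
      = (s1.length + 1) * (s2.length + 1) :=
  (outer_inv s1 s2 M0 h0 s1.length (le_refl _)).1

lemma map_zero_replicate (s1 s2 : List Char) :
    (PySem.List.pyRange 0 (((s1.length : Int) + 1) * ((s2.length : Int) + 1)) 1).map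
        (fun _ => (0 : Int))
      = List.replicate ((s1.length + 1) * (s2.length + 1)) (0 : Int) := by
  rw [PySem.List.pyRange_one, List.map_map]
  have h1 : (((s1.length : Int) + 1) * ((s2.length : Int) + 1) - 0)
      = (((s1.length + 1) * (s2.length + 1) : Nat) : Int) := by push_cast; ring
  rw [h1, Int.toNat_natCast]
  simp [Function.comp_def]

lemma phase1_conv (s1 : List Char) (R : List Int) :
    (PySem.List.pyRange 0 ((s1.length : Int) + 1) 1).foldl
        (fun M i => PySem.List.pySetD M i i) R
      = (List.range (s1.length + 1)).foldl (fun M i => M.set i (i : Int)) R := by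
  rw [PySem.List.pyRange_one]
  have h1 : (((s1.length : Int) + 1) - 0).toNat = s1.length + 1 := by omega
  rw [h1, List.foldl_map]
  refine PySem.List.foldl_congr_mem _ _ _ _ (fun acc k _ => ?_)
  simp [PySem.List.pySetD_natCast]

lemma phase2_conv (s1 s2 : List Char) (R : List Int)
    (hR : R.length = (s1.length + 1) * (s2.length + 1)) :
    (PySem.List.pyRange 0 ((R.length : Int)) ((s1.length : Int) + 1)).foldl
        (fun M j => if PySem.Int.mod j ((s1.length : Int) + 1) = 0
          then PySem.List.pySetD M j (PySem.Int.floordiv j ((s1.length : Int) + 1)) else M) R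
      = (List.range (s2.length + 1)).foldl (fun M j => M.set ((s1.length + 1) * j) (j : Int)) R := by
  rw [hR]
  rw [PySem.List.pyRange_of_pos 0 (((s1.length + 1) * (s2.length + 1) : Nat) : Int)
    (show (0 : Int) < ((s1.length : Int) + 1) by positivity)]
  have hNpos : (0 : Int) < (((s1.length + 1) * (s2.length + 1) : Nat) : Int) := by positivity
  rw [if_pos hNpos]
  have h1 : ((((s1.length + 1) * (s2.length + 1) : Nat) : Int) - 0 + ((s1.length : Int) + 1) - 1)
      = (((s1.length + 1) * (s2.length + 1) + s1.length : Nat) : Int) := by push_cast; ring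
  have h2 : ((s1.length : Int) + 1) = ((s1.length + 1 : Nat) : Int) := by push_cast; ring
  have h3 : ((s1.length + 1) * (s2.length + 1) + s1.length) / (s1.length + 1) = s2.length + 1 := by
    have h4 : (s1.length + 1) * (s2.length + 1) + s1.length
        = s1.length + (s2.length + 1) * (s1.length + 1) := by ring
    rw [h4, Nat.add_mul_div_right _ _ (by omega : 0 < s1.length + 1),
      Nat.div_eq_of_lt (by omega), Nat.zero_add]
  rw [h1, h2, ← Int.natCast_div, h3, Int.toNat_natCast, List.foldl_map]
  refine PySem.List.foldl_congr_mem _ _ _ _ (fun acc k _ => ?_)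
  have hz : (0 : Int) + ((s1.length + 1 : Nat) : Int) * (k : Int)
      = (((s1.length + 1) * k : Nat) : Int) := by push_cast; ring
  rw [hz, PySem.Int.mod_natCast, if_pos (by simp [Nat.mul_mod_right]),
    PySem.Int.floordiv_natCast, Nat.mul_div_cancel_left k (by omega),
    PySem.List.pySetD_natCast]

-- ===== B-side lemmas: the wavefront dictionary holds levRef on every processed cell =====

def DGood (s1 s2 : List Char) (p : Nat → Nat → Prop) (D : PySem.Dict (Int × Int) Int) : Prop :=
  ∀ i j : Nat, i ≤ s1.length → j ≤ s2.length → p i j →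
    D.getD ((i : Int), (j : Int)) 0 = (levRef s1 s2 i j : Int)

lemma DGood_mono (s1 s2 : List Char) (p q : Nat → Nat → Prop) (D : PySem.Dict (Int × Int) Int)
    (h : ∀ i j, i ≤ s1.length → j ≤ s2.length → q i j → p i j) :
    DGood s1 s2 p D → DGood s1 s2 q D :=
  fun hD i j hi hj hq => hD i j hi hj (h i j hi hj hq)

lemma cellB_eval (s1 s2 : List Char) (d i0 : Nat) (hi : i0 ≤ s1.length) (hid : i0 ≤ d)
    (hj : d - i0 ≤ s2.length) (D : PySem.Dict (Int × Int) Int)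
    (hD : DGood s1 s2 (fun i j => i + j < d) D) :
    cellB s1 s2 (d : Int) D (i0 : Int)
      = D.insert ((i0 : Int), ((d - i0 : Nat) : Int)) ((levRef s1 s2 i0 (d - i0) : Nat) : Int) := by
  unfold cellB
  have hjint : (d : Int) - (i0 : Int) = ((d - i0 : Nat) : Int) := by omega
  by_cases h0 : i0 = 0
  · subst h0
    rw [if_pos (by norm_num)]
    simp [levRef_zero_left]
  · rw [if_neg (by exact_mod_cast h0)]
    by_cases hj0 : d - i0 = 0
    · rw [if_pos (by rw [hjint, hj0]; rfl)]
      rw [hjint, hj0, levRef_zero_right]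
    · rw [if_neg (by rw [hjint]; exact_mod_cast hj0)]
      obtain ⟨a, rfl⟩ : ∃ a, i0 = a + 1 := ⟨i0 - 1, by omega⟩
      obtain ⟨b, hb⟩ : ∃ b, d - (a + 1) = b + 1 := ⟨d - (a + 1) - 1, by omega⟩
      rw [hjint, hb]
      have e1 : ((a + 1 : Nat) : Int) - 1 = ((a : Nat) : Int) := by push_cast; ring
      have e3 : ((b + 1 : Nat) : Int) - 1 = ((b : Nat) : Int) := by push_cast; ring
      have hv1 := hD a (b + 1) (by omega) (by omega) (by omega)
      have hv2 := hD (a + 1) b (by omega) (by omega) (by omega)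
      have hv3 := hD a b (by omega) (by omega) (by omega)
      rw [e1, e3, PySem.List.pyGetD_natCast, PySem.List.pyGetD_natCast, hv1, hv2, hv3]
      have hlev : levRef s1 s2 (a + 1) (b + 1)
          = min (levRef s1 s2 a (b + 1) + 1) (min (levRef s1 s2 (a + 1) b + 1)
              (levRef s1 s2 a b + (if s1.getD a ' ' = s2.getD b ' ' then 0 else 1))) := by
        rw [levRef]
      rw [hlev]
      push_cast
      rfl

lemma diag_inv (s1 s2 : List Char) (d : Nat) (hd : d ≤ s1.length + s2.length)
    (D : PySem.Dict (Int × Int) Int) (hD : DGood s1 s2 (fun i j => i + j < d) D) :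
    ∀ t, (d - s2.length) + t ≤ min s1.length d + 1 →
      DGood s1 s2 (fun i j => i + j < d ∨ (i + j = d ∧ i < (d - s2.length) + t))
        ((PySem.List.pyRange ((d - s2.length : Nat) : Int)
            (((d - s2.length : Nat) : Int) + ((t : Nat) : Int)) 1).foldl (cellB s1 s2 (d : Int)) D) := by
  intro t
  induction t with
  | zero =>
    intro _
    simp only [Nat.cast_zero, add_zero]
    rw [PySem.List.pyRange_one_eq_nil (le_refl _)]
    refine DGood_mono _ _ _ _ _ (fun i j hi hj hq => ?_) hD
    rcases hq with h | ⟨hsum, hlt⟩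
    · exact h
    · omega
  | succ t ih =>
    intro ht
    have hcast : (((t + 1 : Nat)) : Int) = ((t : Nat) : Int) + 1 := by push_cast; ring
    have hstep : ((d - s2.length : Nat) : Int) + (((t + 1 : Nat)) : Int)
        = (((d - s2.length : Nat) : Int) + ((t : Nat) : Int)) + 1 := by rw [hcast]; ring
    rw [hstep, PySem.List.pyRange_one_succ_right (by omega), List.foldl_append,
      List.foldl_cons, List.foldl_nil]
    have hprev := ih (by omega)
    set i0 : Nat := (d - s2.length) + t with hi0def
    have helem : ((d - s2.length : Nat) : Int) + ((t : Nat) : Int) = ((i0 : Nat) : Int) := by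
      rw [hi0def]; push_cast; ring
    have hi0m : i0 ≤ s1.length := by omega
    have hi0d : i0 ≤ d := by omega
    have hj0n : d - i0 ≤ s2.length := by omega
    rw [helem] at hprev ⊢
    rw [cellB_eval s1 s2 d i0 hi0m hi0d hj0n _
      (DGood_mono _ _ _ _ _ (fun i j hi hj hq => Or.inl hq) hprev)]
    intro i j hi hj hp
    rw [PySem.Dict.getD_insert]
    by_cases hkey : i = i0 ∧ j = d - i0
    · obtain ⟨rfl, rfl⟩ := hkey
      rw [if_pos rfl]
    · have hne : ¬ (((i : Int), (j : Int)) = ((i0 : Int), ((d - i0 : Nat) : Int))) := by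
        simp only [Prod.mk.injEq, Nat.cast_inj]
        exact fun h => hkey h
      rw [if_neg hne]
      refine hprev i j hi hj ?_
      rcases hp with h | ⟨hsum, hlt⟩
      · exact Or.inl h
      · right
        refine ⟨hsum, ?_⟩
        by_cases hii : i = i0
        · exfalso; exact hkey ⟨hii, by omega⟩
        · omega

lemma wave_inv (s1 s2 : List Char) :
    ∀ k, k ≤ s1.length + s2.length + 1 →
      DGood s1 s2 (fun i j => i + j < k)
        ((PySem.List.pyRange 0 ((k : Nat) : Int) 1).foldl
          (diagB s1 s2 (s1.length : Int) (s2.length : Int)) PySem.Dict.empty) := by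
  intro k
  induction k with
  | zero =>
    intro _
    intro i j _ _ hp
    omega
  | succ k ih =>
    intro hk
    have hcast : (((k + 1 : Nat)) : Int) = ((k : Nat) : Int) + 1 := by push_cast; ring
    rw [hcast, PySem.List.pyRange_one_succ_right (by positivity), List.foldl_append,
      List.foldl_cons, List.foldl_nil]
    have hprev := ih (by omega)
    unfold diagB
    have hlo : max 0 (((k : Nat) : Int) - (s2.length : Int)) = ((k - s2.length : Nat) : Int) := by
      omega
    have hhi : min ((s1.length : Int)) ((k : Nat) : Int) + 1
        = ((k - s2.length : Nat) : Int) + (((min s1.length k + 1 - (k - s2.length) : Nat)) : Int) := by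
      omega
    rw [hlo, hhi]
    have hstep := diag_inv s1 s2 k (by omega) _ hprev
      (min s1.length k + 1 - (k - s2.length)) (by omega)
    refine DGood_mono _ _ _ _ _ (fun i j hi hj hq => ?_) hstep
    by_cases hs : i + j < k
    · exact Or.inl hs
    · right
      omega

lemma alt_eq (str1 str2 : String) :
    normal_leven_alt str1 str2 =
      100 - (levRef str1.toList str2.toList str1.toList.length str2.toList.length : Int) := by
  dsimp only [normal_leven_alt]
  have hcast : (str1.toList.length : Int) + (str2.toList.length : Int) + 1
      = (((str1.toList.length + str2.toList.length + 1 : Nat)) : Int) := by push_cast; ring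
  rw [hcast]
  have h := wave_inv str1.toList str2.toList (str1.toList.length + str2.toList.length + 1)
    (le_refl _) str1.toList.length str2.toList.length (le_refl _) (le_refl _) (by omega)
  rw [h]

lemma A_eq (str1 str2 : String) :
    normal_leven str1 str2 =
      100 - (levRef str1.toList str2.toList str1.toList.length str2.toList.length : Int) := by
  dsimp only [normal_leven]
  rw [map_zero_replicate str1.toList str2.toList, phase1_conv, phase2_conv str1.toList str2.toList _
    (by rw [length_foldl_preserve _ _ (by simp), List.length_replicate])]
  have hinit := init_inv str1.toList str2.toList
  have hlen := matrix_final_len str1.toList str2.toList _ hinit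
  have hfin := matrix_final str1.toList str2.toList _ hinit str1.toList.length str2.toList.length
    (le_refl _) (le_refl _)
  set M3 := (PySem.List.pyRange 1 ((str1.toList.length : Int) + 1) 1).foldl
      (outerF str1.toList str2.toList)
      ((List.range (str2.toList.length + 1)).foldl
        (fun M j => M.set ((str1.toList.length + 1) * j) (j : Int))
        ((List.range (str1.toList.length + 1)).foldl (fun M i => M.set i (i : Int))
          (List.replicate ((str1.toList.length + 1) * (str2.toList.length + 1)) 0)))
      with hM3
  have hne : M3 ≠ [] := by
    intro h
    rw [h] at hlen
    simp only [List.length_nil] at hlen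
    nlinarith
  show 100 - PySem.List.pyGetD M3 (-1) 0 = _
  rw [PySem.List.pyGetD_neg_one _ _ hne, List.getLast_eq_getElem]
  have hidx : M3.length - 1 = str2.toList.length * (str1.toList.length + 1) + str1.toList.length := by
    rw [hlen]
    have : (str1.toList.length + 1) * (str2.toList.length + 1)
        = str2.toList.length * (str1.toList.length + 1) + str1.toList.length + 1 := by ring
    omega
  simp only [hidx]
  have hb : str2.toList.length * (str1.toList.length + 1) + str1.toList.length < M3.length := by
    rw [hlen]; nlinarith
  have : M3[str2.toList.length * (str1.toList.length + 1) + str1.toList.length]'hb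
      = M3.getD (str2.toList.length * (str1.toList.length + 1) + str1.toList.length) 0 := by
    rw [List.getD_eq_getElem?_getD, List.getElem?_eq_getElem hb]
    rfl
  rw [this, hfin]

-- ===== VERDICT (by name: the statement is the Claim_ definition above) =====
theorem normal_leven_spec : Claim_equal_normal_leven := by
  intro str1 str2 _
  unfold Spec_normal_leven
  rw [A_eq, alt_eq]
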